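-- pv_equiv track=rewrite | github.com/jk-jung/problem-solving | codewars/5kyu/5_Recursive ASCII Fractals.py | fractalize
-- ===== SOURCE A (Python) =====
-- def fractalize(v, c):
--     if len(v[0]) == 0: return []
--     o = v
--     while c > 1:
--         n, m = len(v), len(v[0])
--         e = ['.' * m for i in range(n)]
--         t = [[v if o[i][j] == '*' else e for j in range(len(o[0]))] for i in range(len(o))]
--         r = []
--         for i in range(len(o)):
--             for j in range(n):
--                 r.append(''.join(x[j] for x in t[i]))
--         v = r
--         c -= 1
--     return v
-- ===== SOURCE B (Python) =====
-- def _assemble(pattern, inner):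
--     # returns pattern with each '*' cell replaced by the inner block and any
--     # other cell by an empty block of inner's size
--     w = len(pattern[0])
--     blank = ['.' * len(inner[0])] * len(inner)
--     out = []
--     for row in pattern:
--         blocks = [inner if ch == '*' else blank for ch in row[:w]]
--         out.extend(''.join(parts) for parts in zip(*blocks))
--     return out
--
-- def fractalize(v, c):
--     if len(v[0]) == 0:
--         return []
--     if c <= 1:
--         return v
--     return _assemble(v, fractalize(v, c - 1))
-- ===== Notes on version B (the rewrite author's own statement) =====
-- stated objective: simpler
-- what changed: Replaces the while loop with its explicit o/e/t/r index scaffolding by direct recursion on c: fractalize(v,c) assembles the base pattern with each '*' cell replaced by fractalize(v,c-1) and every other cell by an empty block of that size, using zip to join block rows instead of nested index loops.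
import Mathlib
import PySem

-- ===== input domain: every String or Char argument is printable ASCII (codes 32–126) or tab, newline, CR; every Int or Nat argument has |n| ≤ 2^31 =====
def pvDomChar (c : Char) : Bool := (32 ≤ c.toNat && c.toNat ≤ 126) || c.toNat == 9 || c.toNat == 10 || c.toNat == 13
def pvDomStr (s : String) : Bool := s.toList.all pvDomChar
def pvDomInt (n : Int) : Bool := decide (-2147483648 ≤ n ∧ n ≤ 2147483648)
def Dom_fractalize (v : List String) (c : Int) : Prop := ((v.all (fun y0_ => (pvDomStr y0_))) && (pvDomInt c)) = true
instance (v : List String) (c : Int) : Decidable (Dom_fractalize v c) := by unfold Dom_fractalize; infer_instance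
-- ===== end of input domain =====

-- B replaces A's while loop and its o/e/t/r index scaffolding by direct recursion on c
-- (each '*' of the base pattern is replaced by the (c-1)-fractal): simpler decomposition, same cost.


-- ===== PORT A =====
-- one iteration of A's while-loop body (o is the original v, held fixed by A)
def stepA (o cur : List String) : List String :=
  let n := cur.length
  let m := (cur.headD "").length
  let e := (List.range n).map (fun _ => String.ofList (List.replicate m '.'))
  let t := (List.range o.length).map (fun i =>
    (List.range (o.headD "").length).map (fun j =>
      if (o.getD i "").toList.getD j ' ' == '*' then cur else e))
  (List.range o.length).flatMap (fun i =>
    (List.range n).map (fun j =>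
      String.ofList (((t.getD i []).map (fun x => (x.getD j "").toList)).flatten)))

-- the while loop: runs (c-1).toNat times, state is cur
def loopA (o cur : List String) : Nat → List String
  | 0 => cur
  | k + 1 => loopA o (stepA o cur) k

def fractalize (v : List String) (c : Int) : List String :=
  if (v.headD "").length = 0 then [] else loopA v v (c - 1).toNat

-- ===== PORT B =====
-- Source B's _assemble: pattern with '*' cells replaced by inner, others by an empty block of inner's size.
-- zip(*blocks) is ported as List.range inner.length (every block has exactly inner.length rows).
def assembleB (pattern inner : List String) : List String :=
  let w := (pattern.headD "").length
  let blank := List.replicate inner.length (String.ofList (List.replicate (inner.headD "").length '.'))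
  pattern.flatMap (fun row =>
    let blocks := (row.toList.take w).map (fun ch => if ch == '*' then inner else blank)
    if blocks.isEmpty then []
    else (List.range inner.length).map (fun k =>
      String.ofList ((blocks.map (fun b => (b.getD k "").toList)).flatten)))

def fractalize_alt (v : List String) (c : Int) : List String :=
  if (v.headD "").length = 0 then []
  else if c ≤ 1 then v
  else assembleB v (fractalize_alt v (c - 1))
termination_by (c - 1).toNat
decreasing_by omega

-- ===== PRECONDITION & SPEC =====
-- Pre_ excludes exactly the inputs on which A raises IndexError: the empty grid (v[0]),
-- and grids with a non-empty first row and some shorter row when c > 1 (o[i][j]).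
def Pre_fractalize (v : List String) (c : Int) : Prop :=
  v ≠ [] ∧ (1 < c → ((v.headD "").length = 0 ∨ ∀ s ∈ v, (v.headD "").length ≤ s.length))
instance (v : List String) (c : Int) : Decidable (Pre_fractalize v c) := by
  unfold Pre_fractalize; infer_instance

def pvWitness_fractalize : List String × Int := (["*.", ".*"], 2)

def Spec_fractalize (v : List String) (c : Int) (out : List String) : Prop := out = fractalize_alt v c
instance (v : List String) (c : Int) (out : List String) : Decidable (Spec_fractalize v c out) := by unfold Spec_fractalize; infer_instance

-- ===== CLAIM (what is proved, stated in full; the proofs are below) =====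
def Claim_equal_fractalize : Prop := ∀ (v : List String) (c : Int), Dom_fractalize v c → Pre_fractalize v c → Spec_fractalize v c (fractalize v c)

-- ===== LEMMAS AND PROOFS =====

-- iterating over indices of l equals iterating over l (map form)
theorem map_range_getD {α β : Type} (l : List α) (d : α) (F : α → β) (G : ℕ → β)
    (h : ∀ i, i < l.length → G i = F (l.getD i d)) :
    (List.range l.length).map G = l.map F := by
  induction l generalizing G with
  | nil => simp
  | cons a l ih =>
    rw [List.length_cons, List.range_succ_eq_map]
    simp only [List.map_cons, List.map_map]
    congr 1
    · simpa using h 0 (by simp)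
    · exact ih (fun i => G (i + 1)) (fun i hi => by simpa using h (i + 1) (by simpa using hi))

-- iterating over indices of l equals iterating over l (flatMap form)
theorem flatMap_range_getD {α β : Type} (l : List α) (d : α) (F : α → List β) (G : ℕ → List β)
    (h : ∀ i, i < l.length → G i = F (l.getD i d)) :
    (List.range l.length).flatMap G = l.flatMap F := by
  induction l generalizing G with
  | nil => simp
  | cons a l ih =>
    rw [List.length_cons, List.range_succ_eq_map]
    simp only [List.flatMap_cons, List.flatMap_map]
    rw [h 0 (by simp), ih (fun i => G (i + 1)) (fun i hi => by simpa using h (i + 1) (by simpa using hi))]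
    simp

theorem getD_map_range {β : Type} (N i : ℕ) (g : ℕ → β) (d : β) (hi : i < N) :
    ((List.range N).map g).getD i d = g i := by
  simp [List.getD, hi]

-- one loop-body iteration of A equals B's assembly, given the conditions Pre_ puts on the base pattern
theorem step_eq (o cur : List String) (hw : (o.headD "").length ≠ 0)
    (hrows : ∀ s ∈ o, (o.headD "").length ≤ s.length) :
    stepA o cur = assembleB o cur := by
  unfold stepA assembleB
  simp only []
  apply flatMap_range_getD o "" _ _
  intro i hi
  set w := (o.headD "").length with hwdef
  have hoi : o.getD i "" = o[i] := by
    simp [List.getD, List.getElem?_eq_getElem hi]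
  have hrow : w ≤ (o.getD i "").length := by
    rw [hoi]; exact hrows _ (List.getElem_mem hi)
  have hlen : ((o.getD i "").toList.take w).length = w := by
    have h1 : (o.getD i "").toList.length = (o.getD i "").length := by
      simp
    rw [List.length_take]
    omega
  have hblocks : (((o.getD i "").toList.take w).map
      (fun ch => if ch == '*' then cur else List.replicate cur.length
        (String.ofList (List.replicate (cur.headD "").length '.')))).isEmpty = false := by
    rw [List.isEmpty_eq_false_iff_exists_mem]
    have h0 : 0 < ((o.getD i "").toList.take w).length := by omega
    exact ⟨_, List.mem_map_of_mem (List.getElem_mem h0)⟩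
  rw [hblocks]
  simp only [Bool.false_eq_true, if_false]
  -- reduce t.getD i [] and identify the two block lists
  rw [getD_map_range o.length i _ [] hi]
  have hblockeq :
      (List.range w).map (fun j => if (o.getD i "").toList.getD j ' ' == '*' then cur
        else (List.range cur.length).map (fun _ => String.ofList (List.replicate (cur.headD "").length '.')))
      = ((o.getD i "").toList.take w).map
        (fun ch => if ch == '*' then cur else List.replicate cur.length
          (String.ofList (List.replicate (cur.headD "").length '.'))) := by
    conv_lhs => rw [← hlen]
    apply map_range_getD _ ' '
    intro j hj
    rw [hlen] at hj
    have hg : ((o.getD i "").toList.take w).getD j ' ' = (o.getD i "").toList.getD j ' ' := by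
      simp [List.getD, hj]
    rw [hg]
    by_cases hch : ((o.getD i "").toList.getD j ' ' == '*') = true
    · simp
    · simp [List.map_const']
  rw [hblockeq]

theorem loopA_succ (o : List String) : ∀ (k : ℕ) (cur : List String),
    loopA o cur (k + 1) = stepA o (loopA o cur k) := by
  intro k
  induction k with
  | zero => intro cur; rfl
  | succ k ih => intro cur; rw [show k + 1 + 1 = (k + 1) + 1 from rfl]; exact ih (stepA o cur)

theorem main_aux (v : List String) (hw : (v.headD "").length ≠ 0)
    (hrows : ∀ s ∈ v, (v.headD "").length ≤ s.length) :
    ∀ (k : ℕ) (c : Int), (c - 1).toNat = k → loopA v v k = fractalize_alt v c := by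
  intro k
  induction k with
  | zero =>
    intro c hc
    have hc1 : c ≤ 1 := by omega
    rw [fractalize_alt, if_neg hw, if_pos hc1]
    rfl
  | succ k ih =>
    intro c hc
    have hc1 : ¬ c ≤ 1 := by omega
    rw [loopA_succ, step_eq v _ hw hrows, ih (c - 1) (by omega)]
    conv_rhs => rw [fractalize_alt]
    rw [if_neg hw, if_neg hc1]

-- ===== VERDICT (by name: the statement is the Claim_ definition above) =====
theorem fractalize_spec : Claim_equal_fractalize := by
  intro v c _hdom hpre
  obtain ⟨hv, hc⟩ := hpre
  unfold Spec_fractalize fractalize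
  by_cases hw : (v.headD "").length = 0
  · rw [if_pos hw, fractalize_alt, if_pos hw]
  · rw [if_neg hw]
    by_cases hc1 : c ≤ 1
    · have : (c - 1).toNat = 0 := by omega
      rw [this, fractalize_alt, if_neg hw, if_pos hc1]
      rfl
    · have hrows : ∀ s ∈ v, (v.headD "").length ≤ s.length := by
        rcases hc (by omega) with h0 | h1
        · exact absurd h0 hw
        · exact h1
      exact main_aux v hw hrows _ c rfl
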